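-- pv_equiv track=rewrite | github.com/zakhar-kogan/cayleyrl-iclr-2026 | cayleypy/puzzles/hungarian_rings.py | get_pair_variants
-- ===== SOURCE A (Python) =====
-- def get_pair_variants(left_size, right_size):
--     """
--     non-repeating index variants for two intersections
--     """
--     result = []
--     for left_index in range(1, left_size // 2 + 1):
--         for right_index in range(1, right_size // 2 + 1):
--             parameters = (left_size, left_index, right_size, right_index)
--             clone = (right_size, right_index, left_size, left_index)
--             if parameters not in result and clone not in result:
--                 result.append(parameters)
--     return result
-- ===== SOURCE B (Python) =====
-- def get_pair_variants(left_size, right_size):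
--     """
--     non-repeating index variants for two intersections
--     """
--     same = left_size == right_size
--     return [
--         (left_size, left_index, right_size, right_index)
--         for left_index in range(1, left_size // 2 + 1)
--         for right_index in range(1, right_size // 2 + 1)
--         if not (same and right_index < left_index)
--     ]
-- ===== Notes on version B (the rewrite author's own statement) =====
-- stated objective: faster
-- what changed: Drops the result-list membership dedup entirely: B emits pairs in one comprehension guarded by the closed-form mirror condition (skip when left_size == right_size and right_index < left_index), never scanning the result list.
import Mathlib
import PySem

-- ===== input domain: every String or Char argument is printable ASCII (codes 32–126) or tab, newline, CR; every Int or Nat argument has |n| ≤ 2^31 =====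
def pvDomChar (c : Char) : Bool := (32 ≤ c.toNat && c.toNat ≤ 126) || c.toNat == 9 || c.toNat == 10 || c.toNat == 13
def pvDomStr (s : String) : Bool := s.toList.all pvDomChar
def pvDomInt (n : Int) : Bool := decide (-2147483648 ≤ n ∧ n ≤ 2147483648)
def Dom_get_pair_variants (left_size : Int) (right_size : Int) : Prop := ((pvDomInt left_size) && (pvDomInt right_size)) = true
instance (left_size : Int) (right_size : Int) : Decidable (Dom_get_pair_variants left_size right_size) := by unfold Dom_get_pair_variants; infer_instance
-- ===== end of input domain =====

-- B replaces A's quadratic result-list membership dedup by a single guarded comprehension (simpler).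

-- ===== PORT A =====
def get_pair_variants (left_size : Int) (right_size : Int) : List (List Int) :=
  (PySem.List.pyRange 1 (PySem.Int.floordiv left_size 2 + 1) 1).foldl (fun result left_index =>
    (PySem.List.pyRange 1 (PySem.Int.floordiv right_size 2 + 1) 1).foldl (fun result right_index =>
      let parameters := [left_size, left_index, right_size, right_index]
      let clone := [right_size, right_index, left_size, left_index]
      if parameters ∉ result ∧ clone ∉ result then result ++ [parameters] else result)
      result) []

-- ===== PORT B =====
def get_pair_variants_alt (left_size : Int) (right_size : Int) : List (List Int) :=
  let same : Bool := left_size == right_size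
  (PySem.List.pyRange 1 (PySem.Int.floordiv left_size 2 + 1) 1).flatMap (fun left_index =>
    ((PySem.List.pyRange 1 (PySem.Int.floordiv right_size 2 + 1) 1).filter
        (fun right_index => !(same && decide (right_index < left_index)))).map
      (fun right_index => [left_size, left_index, right_size, right_index]))

-- ===== PRECONDITION & SPEC =====
def Spec_get_pair_variants (left_size : Int) (right_size : Int) (out : List (List Int)) : Prop := out = get_pair_variants_alt left_size right_size
instance (left_size : Int) (right_size : Int) (out : List (List Int)) : Decidable (Spec_get_pair_variants left_size right_size out) := by unfold Spec_get_pair_variants; infer_instance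

-- ===== CLAIM (what is proved, stated in full; the proofs are below) =====
def Claim_equal_get_pair_variants : Prop := ∀ (left_size : Int) (right_size : Int), Dom_get_pair_variants left_size right_size → Spec_get_pair_variants left_size right_size (get_pair_variants left_size right_size)

-- ===== LEMMAS AND PROOFS =====

-- the filter predicate of B
def pvFil (ls rs li ri : Int) : Bool := !((ls == rs) && decide (ri < li))

-- one row of B's output: the pairs kept for a fixed left_index, right_index ranging over pyRange 1 b 1
def pvRow (ls rs li b : Int) : List (List Int) :=
  ((PySem.List.pyRange 1 b 1).filter (fun ri => pvFil ls rs li ri)).map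
    (fun ri => [ls, li, rs, ri])

-- B's output restricted to left_index ranging over pyRange 1 b 1 (full inner range)
def pvRes (ls rs b : Int) : List (List Int) :=
  (PySem.List.pyRange 1 b 1).flatMap (fun li => pvRow ls rs li (PySem.Int.floordiv rs 2 + 1))

lemma pvRes_eq_alt (ls rs : Int) :
    get_pair_variants_alt ls rs = pvRes ls rs (PySem.Int.floordiv ls 2 + 1) := rfl

lemma mem_pvRow (ls rs li b p q r s : Int) :
    [p, q, r, s] ∈ pvRow ls rs li b ↔
      p = ls ∧ q = li ∧ r = rs ∧ (1 ≤ s ∧ s < b) ∧ pvFil ls rs li s = true := by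
  simp only [pvRow, List.mem_map, List.mem_filter, PySem.List.mem_pyRange_one]
  constructor
  · rintro ⟨ri, ⟨hmem, hfil⟩, heq⟩
    obtain ⟨h1, h2, h3, h4⟩ : ls = p ∧ li = q ∧ rs = r ∧ ri = s := by
      simpa using heq
    subst h1; subst h2; subst h3; subst h4
    exact ⟨rfl, rfl, rfl, hmem, hfil⟩
  · rintro ⟨h1, h2, h3, hmem, hfil⟩
    exact ⟨s, ⟨hmem, hfil⟩, by simp [h1, h2, h3]⟩

lemma mem_pvRes (ls rs b p q r s : Int) :
    [p, q, r, s] ∈ pvRes ls rs b ↔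
      p = ls ∧ r = rs ∧ (1 ≤ q ∧ q < b) ∧
        (1 ≤ s ∧ s < PySem.Int.floordiv rs 2 + 1) ∧ pvFil ls rs q s = true := by
  simp only [pvRes, List.mem_flatMap, mem_pvRow, PySem.List.mem_pyRange_one]
  constructor
  · rintro ⟨li, hli, h1, h2, h3, hs, hfil⟩
    subst h2; exact ⟨h1, h3, hli, hs, hfil⟩
  · rintro ⟨h1, h3, hq, hs, hfil⟩
    exact ⟨q, hq, h1, rfl, h3, hs, hfil⟩

-- inner loop of A, with accumulator pvRes ls rs li ++ pvRow ls rs li a, advances the row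
lemma pv_inner (ls rs li : Int) (hli1 : 1 ≤ li) (hli2 : li < PySem.Int.floordiv ls 2 + 1) :
    ∀ (k : Nat) (a : Int), 1 ≤ a → PySem.Int.floordiv rs 2 + 1 - a = (k : Int) →
    (PySem.List.pyRange a (PySem.Int.floordiv rs 2 + 1) 1).foldl (fun result right_index =>
        let parameters := [ls, li, rs, right_index]
        let clone := [rs, right_index, ls, li]
        if parameters ∉ result ∧ clone ∉ result then result ++ [parameters] else result)
      (pvRes ls rs li ++ pvRow ls rs li a)
    = pvRes ls rs li ++ pvRow ls rs li (PySem.Int.floordiv rs 2 + 1) := by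
  intro k
  induction k with
  | zero =>
    intro a ha hk
    have hend : PySem.Int.floordiv rs 2 + 1 = a := by omega
    rw [PySem.List.pyRange_one_eq_nil (by omega), hend]
    rfl
  | succ k ih =>
    intro a ha hk
    have hab : a < PySem.Int.floordiv rs 2 + 1 := by omega
    rw [PySem.List.pyRange_one_cons hab, List.foldl_cons]
    -- evaluate the condition at right_index = a
    have hparam : [ls, li, rs, a] ∉ pvRes ls rs li ++ pvRow ls rs li a := by
      simp only [List.mem_append, mem_pvRes, mem_pvRow]
      omega
    have hrow : pvRow ls rs li (a + 1) =
        if pvFil ls rs li a then pvRow ls rs li a ++ [[ls, li, rs, a]] else pvRow ls rs li a := by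
      simp only [pvRow, PySem.List.pyRange_one_succ_right ha, List.filter_append,
        List.map_append, List.filter]
      split <;> simp [*]
    by_cases hcl : ls = rs ∧ a < li
    · -- clone is already present in pvRes (the mirrored pair was appended earlier): skip
      obtain ⟨hceq, hclt⟩ := hcl
      have hmeq : PySem.Int.floordiv ls 2 = PySem.Int.floordiv rs 2 := by rw [hceq]
      have hclone : [rs, a, ls, li] ∈ pvRes ls rs li ++ pvRow ls rs li a := by
        simp only [List.mem_append, mem_pvRes]
        refine Or.inl ⟨hceq.symm, hceq, ⟨by omega, hclt⟩, ⟨hli1, by omega⟩, ?_⟩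
        simp only [pvFil, hceq, beq_self_eq_true, Bool.true_and, Bool.not_eq_true',
          decide_eq_false_iff_not, not_lt]
        omega
      have hfil : pvFil ls rs li a = false := by
        simp [pvFil, hceq, hclt]
      have hcond : ¬ ([ls, li, rs, a] ∉ (pvRes ls rs li ++ pvRow ls rs li a) ∧
          [rs, a, ls, li] ∉ (pvRes ls rs li ++ pvRow ls rs li a)) := fun h => h.2 hclone
      rw [if_neg hcond]
      have : pvRow ls rs li (a + 1) = pvRow ls rs li a := by rw [hrow, hfil]; rfl
      rw [← this] at *
      exact ih (a + 1) (by omega) (by omega)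
    · -- no mirror collision: append, matching B's filter
      have hfil : pvFil ls rs li a = true := by
        simp only [pvFil]
        simp only [not_and, not_lt] at hcl
        by_cases h : ls = rs
        · simp [h]; omega
        · simp [h]
      have hclone : [rs, a, ls, li] ∉ pvRes ls rs li ++ pvRow ls rs li a := by
        intro hmem
        rcases List.mem_append.mp hmem with h | h
        · rw [mem_pvRes] at h
          obtain ⟨h1, -, ⟨-, h3⟩, -, -⟩ := h
          exact hcl ⟨h1.symm, h3⟩
        · rw [mem_pvRow] at h
          obtain ⟨-, h2, -, ⟨-, h4⟩, -⟩ := h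
          omega
      rw [if_pos ⟨hparam, hclone⟩]
      have : pvRes ls rs li ++ pvRow ls rs li a ++ [[ls, li, rs, a]]
          = pvRes ls rs li ++ pvRow ls rs li (a + 1) := by
        rw [hrow, hfil]; simp
      rw [this]
      exact ih (a + 1) (by omega) (by omega)

-- the inner loop started at right_index = 1 (empty inner range included)
lemma pv_inner1 (ls rs li : Int) (hli1 : 1 ≤ li) (hli2 : li < PySem.Int.floordiv ls 2 + 1) :
    (PySem.List.pyRange 1 (PySem.Int.floordiv rs 2 + 1) 1).foldl (fun result right_index =>
        let parameters := [ls, li, rs, right_index]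
        let clone := [rs, right_index, ls, li]
        if parameters ∉ result ∧ clone ∉ result then result ++ [parameters] else result)
      (pvRes ls rs li)
    = pvRes ls rs li ++ pvRow ls rs li (PySem.Int.floordiv rs 2 + 1) := by
  by_cases hm : 1 ≤ PySem.Int.floordiv rs 2 + 1
  · have hrow1 : pvRow ls rs li 1 = [] := by
      unfold pvRow
      rw [PySem.List.pyRange_one_eq_nil le_rfl]
      rfl
    have h := pv_inner ls rs li hli1 hli2 (PySem.Int.floordiv rs 2).toNat 1 le_rfl (by omega)
    rw [hrow1, List.append_nil] at h
    exact h
  · have hnil : PySem.List.pyRange 1 (PySem.Int.floordiv rs 2 + 1) 1 = [] :=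
      PySem.List.pyRange_one_eq_nil (by omega)
    have hrownil : pvRow ls rs li (PySem.Int.floordiv rs 2 + 1) = [] := by
      unfold pvRow
      rw [hnil]
      rfl
    rw [hnil, hrownil, List.foldl_nil, List.append_nil]

-- outer loop of A, with accumulator pvRes ls rs b, advances pvRes
lemma pv_outer (ls rs : Int) :
    ∀ (k : Nat) (b : Int), 1 ≤ b → PySem.Int.floordiv ls 2 + 1 - b = (k : Int) →
    (PySem.List.pyRange b (PySem.Int.floordiv ls 2 + 1) 1).foldl (fun result left_index =>
      (PySem.List.pyRange 1 (PySem.Int.floordiv rs 2 + 1) 1).foldl (fun result right_index =>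
        let parameters := [ls, left_index, rs, right_index]
        let clone := [rs, right_index, ls, left_index]
        if parameters ∉ result ∧ clone ∉ result then result ++ [parameters] else result)
        result) (pvRes ls rs b)
    = pvRes ls rs (PySem.Int.floordiv ls 2 + 1) := by
  intro k
  induction k with
  | zero =>
    intro b hb hk
    have hend : PySem.Int.floordiv ls 2 + 1 = b := by omega
    have hnil : PySem.List.pyRange b (PySem.Int.floordiv ls 2 + 1) 1 = [] :=
      PySem.List.pyRange_one_eq_nil (by omega)
    rw [hnil, List.foldl_nil, hend]
  | succ k ih =>
    intro b hb hk
    have hbl : b < PySem.Int.floordiv ls 2 + 1 := by omega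
    rw [PySem.List.pyRange_one_cons hbl, List.foldl_cons, pv_inner1 ls rs b hb hbl]
    have hres : pvRes ls rs b ++ pvRow ls rs b (PySem.Int.floordiv rs 2 + 1) = pvRes ls rs (b + 1) := by
      unfold pvRes
      rw [PySem.List.pyRange_one_succ_right hb]
      simp
    rw [hres]
    exact ih (b + 1) (by omega) (by omega)

-- ===== VERDICT (by name: the statement is the Claim_ definition above) =====
theorem get_pair_variants_spec : Claim_equal_get_pair_variants := by
  intro ls rs _
  show get_pair_variants ls rs = get_pair_variants_alt ls rs
  rw [pvRes_eq_alt]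
  by_cases h : 0 ≤ PySem.Int.floordiv ls 2
  · have h0 : pvRes ls rs 1 = [] := by
      unfold pvRes
      rw [PySem.List.pyRange_one_eq_nil le_rfl]
      rfl
    have hmain := pv_outer ls rs (PySem.Int.floordiv ls 2).toNat 1 le_rfl (by omega)
    rw [h0] at hmain
    exact hmain
  · have hnil : PySem.List.pyRange 1 (PySem.Int.floordiv ls 2 + 1) 1 = [] :=
      PySem.List.pyRange_one_eq_nil (by omega)
    unfold get_pair_variants pvRes
    rw [hnil]
    rfl
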